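-- pv_equiv track=rewrite | github.com/rodenki/PlutoTools | lookup.py | supIPs
-- ===== SOURCE A (Python) =====
-- def supIPs(ranges):
--     addresses = []
--     for a in ranges[0]:
--         for b in ranges[1]:
--             for c in ranges[2]:
--                 for d in ranges[3]:
--                     addresses.append(str(a) + "." + str(b) + "." + str(c) + "." + str(d))
--     return addresses
-- ===== SOURCE B (Python) =====
-- def supIPs(ranges):
--     parts = [str(a) for a in ranges[0]]
--     for i in (1, 2, 3):
--         parts = [p + "." + str(x) for p in parts for x in ranges[i]]
--     return parts
-- ===== Notes on version B (the rewrite author's own statement) =====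
-- stated objective: alternative
-- what changed: Replaces the four fixed nested loops with an incremental fold over the octet dimensions that maintains a running list of partial dotted strings and extends it one dimension at a time.
import Mathlib
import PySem

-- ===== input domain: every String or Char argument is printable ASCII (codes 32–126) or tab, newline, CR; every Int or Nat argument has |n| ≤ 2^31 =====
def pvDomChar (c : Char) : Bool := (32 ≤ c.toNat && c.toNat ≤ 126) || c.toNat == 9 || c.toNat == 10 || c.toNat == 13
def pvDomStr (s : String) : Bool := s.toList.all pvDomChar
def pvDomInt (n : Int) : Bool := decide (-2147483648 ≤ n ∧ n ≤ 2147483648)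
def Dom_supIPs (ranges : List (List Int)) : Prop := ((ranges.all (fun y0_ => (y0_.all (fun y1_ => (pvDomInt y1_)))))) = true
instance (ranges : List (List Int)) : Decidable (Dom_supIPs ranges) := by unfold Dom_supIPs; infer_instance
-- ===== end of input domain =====

-- B replaces A's four fixed nested loops by an incremental fold that extends a running list of
-- partial dotted strings one octet dimension at a time (objective: alternative decomposition, same cost).

-- ===== PORT A =====
-- Literal port of A: four nested for-loops appending dotted strings; ranges[i] via pyGet?
-- (none = Python's IndexError; those inputs are excluded by Pre_supIPs below).
def supIPs (ranges : List (List Int)) : List String :=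
  match PySem.List.pyGet? ranges 0 with
  | none => []
  | some r0 =>
    r0.foldl (fun acc a =>
      (match PySem.List.pyGet? ranges 1 with
       | none => acc
       | some r1 =>
         r1.foldl (fun acc b =>
           (match PySem.List.pyGet? ranges 2 with
            | none => acc
            | some r2 =>
              r2.foldl (fun acc c =>
                (match PySem.List.pyGet? ranges 3 with
                 | none => acc
                 | some r3 =>
                   r3.foldl (fun acc d =>
                     acc ++ [PySem.Int.toStr a ++ "." ++ PySem.Int.toStr b ++ "." ++
                             PySem.Int.toStr c ++ "." ++ PySem.Int.toStr d]) acc)) acc)) acc)) []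

-- ===== PORT B =====
-- Port of B: a running list of partial dotted strings, extended one octet dimension at a
-- time; ranges[i] is only read once a partial string exists, as in the Python comprehension.
def supIPs_alt (ranges : List (List Int)) : List String :=
  match PySem.List.pyGet? ranges 0 with
  | none => []
  | some r0 =>
    [1, 2, 3].foldl (fun parts i =>
        parts.foldl (fun acc p =>
          (match PySem.List.pyGet? ranges i with
           | none => acc
           | some ri => acc ++ ri.map (fun x => p ++ "." ++ PySem.Int.toStr x))) [])
      (r0.map PySem.Int.toStr)

-- ===== PRECONDITION & SPEC =====
-- Pre_ excludes exactly the inputs on which Python A raises IndexError: fewer than four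
-- ranges while every range before the missing index is nonempty (so the missing one is read).
def Pre_supIPs (ranges : List (List Int)) : Prop :=
  4 ≤ ranges.length ∨
  (1 ≤ ranges.length ∧ ranges.getD 0 [] = []) ∨
  (2 ≤ ranges.length ∧ ranges.getD 1 [] = []) ∨
  (3 ≤ ranges.length ∧ ranges.getD 2 [] = [])
instance (ranges : List (List Int)) : Decidable (Pre_supIPs ranges) := by unfold Pre_supIPs; infer_instance
def pvWitness_supIPs : List (List Int) := [[1, 2], [3], [10], [0, 255]]

def Spec_supIPs (ranges : List (List Int)) (out : List String) : Prop := out = supIPs_alt ranges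
instance (ranges : List (List Int)) (out : List String) : Decidable (Spec_supIPs ranges out) := by unfold Spec_supIPs; infer_instance

-- ===== CLAIM (what is proved, stated in full; the proofs are below) =====
def Claim_equal_supIPs : Prop := ∀ (ranges : List (List Int)), Dom_supIPs ranges → Pre_supIPs ranges → Spec_supIPs ranges (supIPs ranges)

-- ===== LEMMAS AND PROOFS =====

theorem flatten_flatMap_eq {α β : Type} (l : List α) (f : α → List (List β)) :
    (l.flatMap f).flatten = l.flatMap fun x => (f x).flatten := by
  induction l with
  | nil => rfl
  | cons x xs ih => simp [List.flatMap_cons, List.flatten_append, ih]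

theorem flatMap_singleton_eq_map {α β : Type} (l : List α) (f : α → β) :
    (l.flatMap fun x => [f x]) = l.map f := by
  induction l with
  | nil => rfl
  | cons x xs ih => simp [List.flatMap_cons, ih]

-- main case: at least four ranges present; both sides become nested flatMaps
theorem supIPs_main4 (r0 r1 r2 r3 : List Int) (t : List (List Int)) :
    supIPs (r0 :: r1 :: r2 :: r3 :: t) = supIPs_alt (r0 :: r1 :: r2 :: r3 :: t) := by
  have h0 : (0:Int) ≤ (t.length:Int) + 1 + 1 + 1 := by omega
  have h0' : (0:Int) ≤ (t.length:Int) + 1 + 1 := by omega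
  have h2 : (2:Int) ≤ (t.length:Int) + 1 + 1 + 1 := by omega
  have h3 : (3:Int) ≤ (t.length:Int) + 1 + 1 + 1 := by omega
  have g0 : PySem.List.pyGet? (r0 :: r1 :: r2 :: r3 :: t) 0 = some r0 := by
    simp [PySem.List.pyGet?, PySem.List.pyIdx?, h0]
  have g1 : PySem.List.pyGet? (r0 :: r1 :: r2 :: r3 :: t) 1 = some r1 := by
    simp [PySem.List.pyGet?, PySem.List.pyIdx?, h0']
  have g2 : PySem.List.pyGet? (r0 :: r1 :: r2 :: r3 :: t) 2 = some r2 := by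
    simp [PySem.List.pyGet?, PySem.List.pyIdx?, h2]
  have g3 : PySem.List.pyGet? (r0 :: r1 :: r2 :: r3 :: t) 3 = some r3 := by
    simp [PySem.List.pyGet?, PySem.List.pyIdx?, h3]
  simp only [supIPs, supIPs_alt, g0, g1, g2, g3]
  simp [g1, g2, g3, flatten_flatMap_eq, flatMap_singleton_eq_map, ← List.flatMap_def,
        List.map_flatMap, List.map_map, Function.comp_def, String.append_assoc]

-- ===== VERDICT (by name: the statement is the Claim_ definition above) =====
theorem supIPs_spec : Claim_equal_supIPs := by
  intro ranges hdom hpre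
  unfold Spec_supIPs
  match ranges with
  | r0 :: r1 :: r2 :: r3 :: t => exact supIPs_main4 r0 r1 r2 r3 t
  | [] => simp [Pre_supIPs] at hpre
  | [r0] =>
      rcases hpre with h | ⟨_, h⟩ | ⟨h, _⟩ | ⟨h, _⟩ <;> simp_all
      subst h
      simp [supIPs, supIPs_alt, PySem.List.pyGet?, PySem.List.pyIdx?]
  | [r0, r1] =>
      rcases hpre with h | ⟨_, h⟩ | ⟨_, h⟩ | ⟨h, _⟩ <;> simp_all
      · subst h
        simp [supIPs, supIPs_alt, PySem.List.pyGet?, PySem.List.pyIdx?]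
      · subst h
        simp [supIPs, supIPs_alt, PySem.List.pyGet?, PySem.List.pyIdx?]
  | [r0, r1, r2] =>
      rcases hpre with h | ⟨_, h⟩ | ⟨_, h⟩ | ⟨_, h⟩ <;> simp_all
      · subst h
        simp [supIPs, supIPs_alt, PySem.List.pyGet?, PySem.List.pyIdx?]
      · subst h
        simp [supIPs, supIPs_alt, PySem.List.pyGet?, PySem.List.pyIdx?]
      · subst h
        simp [supIPs, supIPs_alt, PySem.List.pyGet?, PySem.List.pyIdx?]
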